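-- pv_equiv track=rewrite | github.com/sunway513/aiter | op_tests/tuning_tests/test_run_config.py | _extract_repro_and_reasons
-- ===== SOURCE A (Python) =====
-- def _extract_repro_and_reasons(lines):
--     """Extract Repro CSV block from tuner output."""
--     parts = []
--     repro = []
--     in_repro = False
--     for line in lines:
--         if "Repro CSV" in line:
--             in_repro = True
--         if in_repro:
--             repro.append(line)
--     if repro:
--         parts.append("\n" + "\n".join(repro))
--     return "\n".join(parts)
-- ===== SOURCE B (Python) =====
-- def _extract_repro_and_reasons(lines):
--     """Extract Repro CSV block from tuner output."""
--     idx = next((i for i, line in enumerate(lines) if "Repro CSV" in line), None)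
--     if idx is None:
--         return ""
--     return "\n" + "\n".join(lines[idx:])
-- ===== Notes on version B (the rewrite author's own statement) =====
-- stated objective: simpler
-- what changed: Replaces the sticky-flag accumulation loop (in_repro/repro/parts) with a locate-then-slice decomposition: find the first line containing 'Repro CSV' and join the tail from there.
import Mathlib
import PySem

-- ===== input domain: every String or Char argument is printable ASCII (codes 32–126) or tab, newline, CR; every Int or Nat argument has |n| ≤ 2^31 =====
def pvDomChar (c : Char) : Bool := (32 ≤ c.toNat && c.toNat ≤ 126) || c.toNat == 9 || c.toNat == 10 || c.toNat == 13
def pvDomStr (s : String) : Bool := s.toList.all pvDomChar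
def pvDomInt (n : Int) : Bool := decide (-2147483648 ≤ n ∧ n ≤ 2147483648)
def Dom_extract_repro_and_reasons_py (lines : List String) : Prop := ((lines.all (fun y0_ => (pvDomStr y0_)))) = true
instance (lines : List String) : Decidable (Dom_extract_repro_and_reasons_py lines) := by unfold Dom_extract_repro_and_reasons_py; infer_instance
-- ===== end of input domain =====

-- B replaces A's sticky-flag accumulation loop with a locate-then-slice decomposition (objective: simpler).

-- ===== PORT A =====
-- loop body of A's 'for line in lines' over the state (repro, in_repro)
def pvStepA (s : List String × Bool) (line : String) : List String × Bool :=
  let in_repro := if PySem.Str.isIn "Repro CSV" line then true else s.2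
  (if in_repro then s.1 ++ [line] else s.1, in_repro)

def extract_repro_and_reasons_py (lines : List String) : String :=
  let st := lines.foldl pvStepA ([], false)
  let parts : List String := if st.1.isEmpty then [] else ["\n" ++ PySem.Str.join "\n" st.1]
  PySem.Str.join "\n" parts

-- ===== PORT B =====
def extract_repro_and_reasons_py_alt (lines : List String) : String :=
  match lines.findIdx? (fun l => PySem.Str.isIn "Repro CSV" l) with
  | none => ""
  | some i => "\n" ++ PySem.Str.join "\n" (lines.drop i)

-- ===== PRECONDITION & SPEC =====
def Spec_extract_repro_and_reasons_py (lines : List String) (out : String) : Prop := out = extract_repro_and_reasons_py_alt lines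
instance (lines : List String) (out : String) : Decidable (Spec_extract_repro_and_reasons_py lines out) := by unfold Spec_extract_repro_and_reasons_py; infer_instance

-- ===== CLAIM (what is proved, stated in full; the proofs are below) =====
def Claim_equal_extract_repro_and_reasons_py : Prop := ∀ (lines : List String), Dom_extract_repro_and_reasons_py lines → Spec_extract_repro_and_reasons_py lines (extract_repro_and_reasons_py lines)

-- ===== LEMMAS AND PROOFS =====

-- once in_repro is set, A's loop appends every remaining line
lemma pvStepA_true (lines : List String) (acc : List String) :
    lines.foldl pvStepA (acc, true) = (acc ++ lines, true) := by
  induction lines generalizing acc with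
  | nil => simp
  | cons l ls ih =>
    have hstep : pvStepA (acc, true) l = (acc ++ [l], true) := by
      simp [pvStepA]
    simp [hstep, ih]

-- from the initial state, A's loop collects exactly the tail from the first match
lemma pvStepA_false (lines : List String) (acc : List String) :
    lines.foldl pvStepA (acc, false) =
      match lines.findIdx? (fun l => PySem.Str.isIn "Repro CSV" l) with
      | none => (acc, false)
      | some i => (acc ++ lines.drop i, true) := by
  induction lines generalizing acc with
  | nil => simp
  | cons l ls ih =>
    cases h : PySem.Str.isIn "Repro CSV" l with
    | true =>
      have h' : PySem.Chars.isIn ['R','e','p','r','o',' ','C','S','V'] l.toList = true := by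
        simpa using h
      have hstep : pvStepA (acc, false) l = (acc ++ [l], true) := by
        simp [pvStepA, h']
      simp [List.findIdx?_cons, h', hstep, pvStepA_true]
    | false =>
      have h' : PySem.Chars.isIn ['R','e','p','r','o',' ','C','S','V'] l.toList = false := by
        simpa using h
      have hstep : pvStepA (acc, false) l = (acc, false) := by
        simp [pvStepA, h']
      simp only [List.foldl_cons, hstep, ih acc, List.findIdx?_cons]
      cases hf : ls.findIdx? (fun l => PySem.Str.isIn "Repro CSV" l)
      · simp [h']
      · simp [h']

lemma pv_join_singleton (x : String) : PySem.Str.join "\n" [x] = x := by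
  simp [PySem.Str.join, PySem.Chars.join, List.intercalate]

-- ===== VERDICT (by name: the statement is the Claim_ definition above) =====
theorem extract_repro_and_reasons_py_spec : Claim_equal_extract_repro_and_reasons_py := by
  unfold Claim_equal_extract_repro_and_reasons_py
  intro lines _
  unfold Spec_extract_repro_and_reasons_py extract_repro_and_reasons_py extract_repro_and_reasons_py_alt
  have h := pvStepA_false lines []
  cases hf : lines.findIdx? (fun l => PySem.Str.isIn "Repro CSV" l) with
  | none =>
    rw [hf] at h
    simp [h, PySem.Str.join, PySem.Chars.join, List.intercalate]
  | some i =>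
    rw [hf] at h
    have hi : i < lines.length := (List.findIdx?_eq_some_iff_getElem.mp hf).1
    have hne : ¬ (lines.drop i).isEmpty := by
      simp [List.isEmpty_iff, List.drop_eq_nil_iff]; omega
    simp [h, hne, pv_join_singleton]
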